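-- pv_equiv track=rewrite | github.com/codewithsneha001/Jala-Assignment | python/4.Arrays1/ConatainsElements.py | contains_elements
-- ===== SOURCE A (Python) =====
-- def contains_elements(arr, val1, val2):
--     found1 = found2 = False
--     for num in arr:
--         if num == val1:
--             found1 = True
--         if num == val2:
--             found2 = True
--     return found1 and found2
-- ===== SOURCE B (Python) =====
-- def contains_elements(arr, val1, val2):
--     return any(num == val1 for num in arr) and any(num == val2 for num in arr)
-- ===== Notes on version B (the rewrite author's own statement) =====
-- stated objective: idiomatic
-- what changed: Replaces the single flag-setting loop that always scans the whole array with two independent short-circuiting any() membership scans combined by 'and'.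
import Mathlib
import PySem

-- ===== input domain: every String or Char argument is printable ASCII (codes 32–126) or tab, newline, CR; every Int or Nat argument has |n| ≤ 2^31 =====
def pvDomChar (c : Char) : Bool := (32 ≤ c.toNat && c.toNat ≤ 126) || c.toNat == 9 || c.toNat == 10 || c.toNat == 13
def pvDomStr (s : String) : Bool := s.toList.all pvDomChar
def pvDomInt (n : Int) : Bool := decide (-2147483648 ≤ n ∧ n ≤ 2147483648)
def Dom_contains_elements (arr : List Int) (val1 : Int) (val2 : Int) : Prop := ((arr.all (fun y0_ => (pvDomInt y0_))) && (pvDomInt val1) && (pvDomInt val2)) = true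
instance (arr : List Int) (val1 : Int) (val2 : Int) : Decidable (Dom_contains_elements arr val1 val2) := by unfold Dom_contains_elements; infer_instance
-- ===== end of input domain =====

-- B replaces A's single full-scan flag loop with two independent short-circuiting any-scans (idiomatic; return value only).

-- ===== PORT A =====
-- one loop over arr carrying the pair of flags (found1, found2)
def contains_elements (arr : List Int) (val1 : Int) (val2 : Int) : Bool :=
  let fs := arr.foldl (fun (st : Bool × Bool) num =>
      (if num == val1 then true else st.1, if num == val2 then true else st.2))
    (false, false)
  fs.1 && fs.2

-- ===== PORT B =====
def contains_elements_alt (arr : List Int) (val1 : Int) (val2 : Int) : Bool :=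
  (arr.any (fun num => num == val1)) && (arr.any (fun num => num == val2))

-- ===== PRECONDITION & SPEC =====
def Spec_contains_elements (arr : List Int) (val1 : Int) (val2 : Int) (out : Bool) : Prop := out = contains_elements_alt arr val1 val2
instance (arr : List Int) (val1 : Int) (val2 : Int) (out : Bool) : Decidable (Spec_contains_elements arr val1 val2 out) := by unfold Spec_contains_elements; infer_instance

-- ===== CLAIM (what is proved, stated in full; the proofs are below) =====
def Claim_equal_contains_elements : Prop := ∀ (arr : List Int) (val1 : Int) (val2 : Int), Dom_contains_elements arr val1 val2 → Spec_contains_elements arr val1 val2 (contains_elements arr val1 val2)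

-- ===== LEMMAS AND PROOFS =====

-- the fold's state is exactly (any so far = val1 ∨ initial, …) componentwise
theorem contains_fold_char (arr : List Int) (val1 val2 : Int) (a b : Bool) :
    arr.foldl (fun (st : Bool × Bool) num =>
      (if num == val1 then true else st.1, if num == val2 then true else st.2)) (a, b)
    = (a || arr.any (fun num => num == val1), b || arr.any (fun num => num == val2)) := by
  induction arr generalizing a b with
  | nil => simp
  | cons x xs ih =>
    simp only [List.foldl_cons, List.any_cons, ih]
    by_cases h1 : x = val1 <;> by_cases h2 : x = val2 <;>
      simp [h1, h2, Bool.beq_eq_decide_eq, Bool.or_comm, Bool.or_assoc]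

-- ===== VERDICT (by name: the statement is the Claim_ definition above) =====
theorem contains_elements_spec : Claim_equal_contains_elements := by
  intro arr val1 val2 _
  show contains_elements arr val1 val2 = contains_elements_alt arr val1 val2
  unfold contains_elements contains_elements_alt
  rw [contains_fold_char]
  simp
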